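-- pv_equiv track=rewrite | github.com/wozniakos10/Reinforcement-Learning | lab_5/llm_inference.py | alternative_reward
-- ===== SOURCE A (Python) =====
-- def alternative_reward(completions, **kwargs):
--     """
--     Bonusing long completions
--     """
--     if type(completions) == list:
--         lst = []
--
--         for completion in completions:
--             splitted = completion.split(" ")
--             lst.append(len(splitted))
--
--         return lst
--     elif type(completions) == str:
--
--         splitted = completions.split(" ")
--         return len(splitted)
-- ===== SOURCE B (Python) =====
-- def _token_count(s):
--     # one hand-rolled pass over the characters: a string splits on " " into
--     # one more piece than it has delimiters, so start at 1 and bump per space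
--     n = 1
--     for ch in s:
--         if ch == " ":
--             n += 1
--     return n
--
--
-- def alternative_reward(completions, **kwargs):
--     """
--     Bonusing long completions
--     """
--     if type(completions) == list:
--         return [_token_count(c) for c in completions]
--     elif type(completions) == str:
--         return _token_count(completions)
-- ===== Notes on version B (the rewrite author's own statement) =====
-- stated objective: alternative
-- what changed: Replaces the append loop calling split(" ")/len per string with a comprehension whose per-string work is a hand-rolled single-pass character scan (accumulator starts at 1, bumped at each space), allocating no intermediate token list and calling no library string routine.
import Mathlib
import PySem

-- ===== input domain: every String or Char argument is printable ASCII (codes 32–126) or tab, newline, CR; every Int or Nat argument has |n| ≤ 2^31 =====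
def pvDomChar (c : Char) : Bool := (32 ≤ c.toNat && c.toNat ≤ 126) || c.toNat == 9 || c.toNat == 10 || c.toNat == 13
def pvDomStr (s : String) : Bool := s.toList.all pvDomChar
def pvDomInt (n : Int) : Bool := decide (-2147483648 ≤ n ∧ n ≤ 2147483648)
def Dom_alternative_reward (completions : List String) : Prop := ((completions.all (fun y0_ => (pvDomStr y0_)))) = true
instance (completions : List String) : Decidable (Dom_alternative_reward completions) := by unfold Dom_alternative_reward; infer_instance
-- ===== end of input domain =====

-- B replaces A's append loop over split(" ")/len with a comprehension whose per-string work
-- is a hand-rolled single-pass character scan (accumulator starts at 1, bumped at each space);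
-- B never calls a library string routine and allocates no intermediate token list.

-- ===== PORT A =====
-- A's list branch: accumulate len(completion.split(" ")) for each completion.
-- sep " " is nonempty, so Python's split never raises: split? returns some; getD [] is unreachable.
def alternative_reward (completions : List String) : List Int :=
  completions.foldl
    (fun lst completion =>
      lst ++ [(((PySem.Str.split? completion " ").getD []).length : Int)])
    []

-- ===== PORT B =====
-- Source B's _token_count: n = 1; for ch in s: if ch == " ": n += 1
def pvTokenCount (s : String) : Int :=
  s.toList.foldl (fun n ch => if ch = ' ' then n + 1 else n) 1

def alternative_reward_alt (completions : List String) : List Int :=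
  completions.map pvTokenCount

-- ===== PRECONDITION & SPEC =====
def Spec_alternative_reward (completions : List String) (out : List Int) : Prop := out = alternative_reward_alt completions
instance (completions : List String) (out : List Int) : Decidable (Spec_alternative_reward completions out) := by unfold Spec_alternative_reward; infer_instance

-- ===== CLAIM (what is proved, stated in full; the proofs are below) =====
def Claim_equal_alternative_reward : Prop := ∀ (completions : List String), Dom_alternative_reward completions → Spec_alternative_reward completions (alternative_reward completions)

-- ===== LEMMAS AND PROOFS =====

-- splitting on a single-char sep produces exactly (count of that char) + 1 pieces
theorem splitOn_go_len (c : Char) (l : List Char) :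
    ∀ (fuel : Nat) (cur : List Char) (acc : List (List Char)), l.length ≤ fuel →
      (PySem.Chars.splitOn.go [c] fuel l cur acc).length = acc.length + 1 + l.count c := by
  induction l with
  | nil =>
    intro fuel cur acc _
    cases fuel <;> simp [PySem.Chars.splitOn.go]
  | cons hd tl ih =>
    intro fuel cur acc hle
    cases fuel with
    | zero => simp at hle
    | succ f =>
      by_cases h : hd = c
      · subst h
        have hpre : [hd].isPrefixOf (hd :: tl) = true := by simp [List.isPrefixOf]
        simp only [PySem.Chars.splitOn.go, hpre, if_pos, List.length_cons, List.drop_succ_cons,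
          List.length_nil, List.drop_zero]
        rw [ih f [] (cur.reverse :: acc) (by simpa using hle)]
        simp
        omega
      · have hpre : [c].isPrefixOf (hd :: tl) = false := by
          simp [List.isPrefixOf, Ne.symm h]
        simp only [PySem.Chars.splitOn.go, hpre]
        rw [if_neg (by simp)]
        rw [ih f (hd :: cur) acc (by simpa using hle)]
        simp [h]

-- Source B's character scan computes (count of ' ') + the initial accumulator
theorem scan_fold_eq (l : List Char) :
    ∀ (n : Int), l.foldl (fun n ch => if ch = ' ' then n + 1 else n) n = n + l.count ' ' := by
  induction l with
  | nil => intro n; simp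
  | cons hd tl ih =>
    intro n
    by_cases h : hd = ' ' <;> simp [h, ih] <;> push_cast <;> ring

theorem per_string (s : String) :
    (((PySem.Str.split? s " ").getD []).length : Int) = pvTokenCount s := by
  have h1 : PySem.Str.split? s " " = some ((PySem.Chars.splitOn s.toList [' ']).map String.ofList) := by
    simp [PySem.Str.split?, PySem.Chars.split?]
  rw [h1]
  unfold pvTokenCount
  rw [scan_fold_eq]
  simp only [Option.getD_some, List.length_map]
  unfold PySem.Chars.splitOn
  rw [splitOn_go_len ' ' s.toList (s.toList.length + 1) [] [] (by omega)]
  simp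

-- ===== VERDICT (by name: the statement is the Claim_ definition above) =====
theorem alternative_reward_spec : Claim_equal_alternative_reward := by
  intro completions _
  unfold Spec_alternative_reward alternative_reward alternative_reward_alt
  rw [PySem.List.foldl_append_singleton_eq_map]
  simp only [List.nil_append]
  exact List.map_congr_left (fun s _ => per_string s)
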